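-- pv_equiv track=rewrite | github.com/ozendelait/naphash | experiments/cifar10_trainer.py | reduce_to
-- ===== SOURCE A (Python) =====
-- def get_cat(p):
--     return p.split('/')[-2]
--
-- def reduce_to(cifar10_paths, max_num=5000, per_cat={}, multiple_cat={}, idx_train=10000):
--     train_paths_cat, cnt_num = {}, {}
--     for p in cifar10_paths[idx_train:]:
--         cat = get_cat(p)
--         if cnt_num.get(cat,0) >= per_cat.get(cat,max_num):
--             continue
--         train_paths_cat.setdefault(cat,[]).append(p)
--         cnt_num[cat] = cnt_num.get(cat,0)+1
--     train_paths = []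
--     for c in train_paths_cat.keys():
--         for _ in range(multiple_cat.get(c,1)):
--             train_paths += train_paths_cat[c]
--     return cifar10_paths[:idx_train]+train_paths
-- ===== SOURCE B (Python) =====
-- def get_cat(p):
--     return p.split('/')[-2]
--
-- def reduce_to(cifar10_paths, max_num=5000, per_cat={}, multiple_cat={}, idx_train=10000):
--     buckets = {}
--     for p in cifar10_paths[idx_train:]:
--         buckets.setdefault(get_cat(p), []).append(p)
--     out = list(cifar10_paths[:idx_train])
--     for cat, paths in buckets.items():
--         cap = per_cat.get(cat, max_num)
--         if cap > 0:
--             out += paths[:cap] * multiple_cat.get(cat, 1)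
--     return out
-- ===== Notes on version B (the rewrite author's own statement) =====
-- stated objective: alternative
-- what changed: A caps while scanning with a separate count dict and 'continue' and then replicates via a nested range loop; B groups uncapped in one pass and applies the cap as a post-hoc slice and the replication as list multiplication in a single guarded pass over the buckets.
import Mathlib
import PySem

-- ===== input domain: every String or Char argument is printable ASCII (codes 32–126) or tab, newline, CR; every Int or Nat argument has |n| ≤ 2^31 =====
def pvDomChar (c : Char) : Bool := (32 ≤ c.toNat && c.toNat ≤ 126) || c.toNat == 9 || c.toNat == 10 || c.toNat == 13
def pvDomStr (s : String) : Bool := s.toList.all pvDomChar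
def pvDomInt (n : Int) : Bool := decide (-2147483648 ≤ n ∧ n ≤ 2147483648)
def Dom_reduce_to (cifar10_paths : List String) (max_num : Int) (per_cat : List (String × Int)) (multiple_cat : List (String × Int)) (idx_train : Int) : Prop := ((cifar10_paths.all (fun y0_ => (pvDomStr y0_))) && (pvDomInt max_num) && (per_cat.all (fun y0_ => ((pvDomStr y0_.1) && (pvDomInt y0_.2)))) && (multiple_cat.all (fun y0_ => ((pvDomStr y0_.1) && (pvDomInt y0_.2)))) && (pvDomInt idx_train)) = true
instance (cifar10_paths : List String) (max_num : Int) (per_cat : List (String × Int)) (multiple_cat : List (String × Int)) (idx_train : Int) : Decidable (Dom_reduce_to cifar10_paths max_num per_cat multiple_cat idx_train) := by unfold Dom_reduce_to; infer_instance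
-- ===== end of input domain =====

-- B replaces A's cap-during-scan counter dict + nested replication loop by uncapped grouping,
-- then a post-hoc slice and list multiplication per bucket (objective: alternative decomposition, same cost).

-- ===== PORT A =====
-- d.get(k, dflt) on a python-dict parameter (association list, first match)
def dget (l : List (String × Int)) (k : String) (d : Int) : Int :=
  (List.lookup k l).getD d

-- get_cat(p) = p.split('/')[-2]; split? is some (sep "/" is nonempty); the final .getD "" arm
-- is reached exactly where Python raises IndexError (no '/' in p), excluded by Pre_.
def getCatA (p : String) : String :=
  (PySem.List.pyGet? ((PySem.Str.split? p "/").getD []) (-2)).getD ""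

-- one iteration of A's first loop over (train_paths_cat, cnt_num)
def stepA (per : List (String × Int)) (mx : Int)
    (st : PySem.Dict String (List String) × PySem.Dict String Int) (p : String) :
    PySem.Dict String (List String) × PySem.Dict String Int :=
  let cat := getCatA p
  if st.2.getD cat 0 ≥ dget per cat mx then st
  else (st.1.modify cat [] (· ++ [p]), st.2.insert cat (st.2.getD cat 0 + 1))

def reduce_to (cifar10_paths : List String) (max_num : Int) (per_cat : List (String × Int)) (multiple_cat : List (String × Int)) (idx_train : Int) : List String :=
  let st := (PySem.List.slice cifar10_paths (some idx_train) none).foldl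
      (stepA per_cat max_num) (PySem.Dict.empty, PySem.Dict.empty)
  let train_paths := st.1.keys.foldl (fun acc c =>
      (PySem.List.pyRange 0 (dget multiple_cat c 1) 1).foldl
        (fun a _ => a ++ st.1.getD c []) acc) []
  PySem.List.slice cifar10_paths none (some idx_train) ++ train_paths

-- ===== PORT B =====
def getCatB (p : String) : String :=
  (PySem.List.pyGet? ((PySem.Str.split? p "/").getD []) (-2)).getD ""

def reduce_to_alt (cifar10_paths : List String) (max_num : Int) (per_cat : List (String × Int)) (multiple_cat : List (String × Int)) (idx_train : Int) : List String :=
  let buckets := (PySem.List.slice cifar10_paths (some idx_train) none).foldl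
      (fun b p => b.modify (getCatB p) [] (· ++ [p])) PySem.Dict.empty
  -- paths[:cap] * m : Python list*m with m ≤ 0 is [], exactly .toNat
  buckets.items.foldl (fun out q =>
      if 0 < dget per_cat q.1 max_num then
        out ++ (List.replicate (dget multiple_cat q.1 1).toNat
                  (PySem.List.slice q.2 none (some (dget per_cat q.1 max_num)))).flatten
      else out)
    (PySem.List.slice cifar10_paths none (some idx_train))

-- ===== PRECONDITION & SPEC =====
-- Pre_ excludes exactly the inputs on which Python A raises IndexError: some path in
-- cifar10_paths[idx_train:] contains no '/', so p.split('/')[-2] is out of range.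
def Pre_reduce_to (cifar10_paths : List String) (max_num : Int) (per_cat : List (String × Int)) (multiple_cat : List (String × Int)) (idx_train : Int) : Prop :=
  ∀ p ∈ PySem.List.slice cifar10_paths (some idx_train) none, PySem.Str.isIn "/" p = true
instance (cifar10_paths : List String) (max_num : Int) (per_cat : List (String × Int)) (multiple_cat : List (String × Int)) (idx_train : Int) : Decidable (Pre_reduce_to cifar10_paths max_num per_cat multiple_cat idx_train) := by unfold Pre_reduce_to; infer_instance

def pvWitness_reduce_to : List String × Int × (List (String × Int)) × (List (String × Int)) × Int :=
  (["cat0/a.png", "cat1/b.png", "cat0/c.png"], 1, [("cat1", 2)], [("cat0", 2)], 1)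

def Spec_reduce_to (cifar10_paths : List String) (max_num : Int) (per_cat : List (String × Int)) (multiple_cat : List (String × Int)) (idx_train : Int) (out : List String) : Prop := out = reduce_to_alt cifar10_paths max_num per_cat multiple_cat idx_train
instance (cifar10_paths : List String) (max_num : Int) (per_cat : List (String × Int)) (multiple_cat : List (String × Int)) (idx_train : Int) (out : List String) : Decidable (Spec_reduce_to cifar10_paths max_num per_cat multiple_cat idx_train out) := by unfold Spec_reduce_to; infer_instance

-- ===== CLAIM (what is proved, stated in full; the proofs are below) =====
def Claim_equal_reduce_to : Prop := ∀ (cifar10_paths : List String) (max_num : Int) (per_cat : List (String × Int)) (multiple_cat : List (String × Int)) (idx_train : Int), Dom_reduce_to cifar10_paths max_num per_cat multiple_cat idx_train → Pre_reduce_to cifar10_paths max_num per_cat multiple_cat idx_train → Spec_reduce_to cifar10_paths max_num per_cat multiple_cat idx_train (reduce_to cifar10_paths max_num per_cat multiple_cat idx_train)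

-- ===== LEMMAS AND PROOFS =====

theorem pvWitness_ok :
    Dom_reduce_to (pvWitness_reduce_to.1) (pvWitness_reduce_to.2.1) (pvWitness_reduce_to.2.2.1) (pvWitness_reduce_to.2.2.2.1) (pvWitness_reduce_to.2.2.2.2)
    ∧ Pre_reduce_to (pvWitness_reduce_to.1) (pvWitness_reduce_to.2.1) (pvWitness_reduce_to.2.2.1) (pvWitness_reduce_to.2.2.2.1) (pvWitness_reduce_to.2.2.2.2) := by
  constructor <;> decide

-- repeating `acc ++ v` once per element of any list
theorem foldl_repeat_append {α β : Type} (v : List α) (L : List β) (acc : List α) :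
    L.foldl (fun a _ => a ++ v) acc = acc ++ (List.replicate L.length v).flatten := by
  induction L generalizing acc with
  | nil => simp
  | cons x L ih => simp [ih, List.replicate_succ]

theorem length_pyRange_zero (m : Int) : (PySem.List.pyRange 0 m 1).length = m.toNat := by
  simp [pysem]

-- shape of A's output loop
theorem foldl_keys_repeat (ks : List String) (F : String → List String) (M : String → Int)
    (acc : List String) :
    ks.foldl (fun acc c => (PySem.List.pyRange 0 (M c) 1).foldl (fun a _ => a ++ F c) acc) acc
      = acc ++ ks.flatMap (fun c => (List.replicate (M c).toNat (F c)).flatten) := by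
  simp only [foldl_repeat_append, length_pyRange_zero]
  exact PySem.List.foldl_append_eq_flatMap _ _ _

-- shape of B's output loop
theorem foldl_guard_append {β : Type} (P : β → Prop) [DecidablePred P] (G : β → List String)
    (L : List β) (acc : List String) :
    L.foldl (fun a x => if P x then a ++ G x else a) acc
      = acc ++ (L.filter (fun x => decide (P x))).flatMap G := by
  induction L generalizing acc with
  | nil => simp
  | cons x L ih => by_cases h : P x <;> simp [h, ih]

-- invariant of A's first loop: counts, capped buckets, and key order
theorem stateA_spec (per : List (String × Int)) (mx : Int) (l : List String) :
    (∀ c, ((l.foldl (stepA per mx) (PySem.Dict.empty, PySem.Dict.empty)).2.getD c 0)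
        = max 0 (min (dget per c mx) ((l.filter (fun p => getCatA p == c)).length : Int)))
    ∧ (∀ c, ((l.foldl (stepA per mx) (PySem.Dict.empty, PySem.Dict.empty)).1.getD c [])
        = (l.filter (fun p => getCatA p == c)).take (dget per c mx).toNat)
    ∧ ((l.foldl (stepA per mx) (PySem.Dict.empty, PySem.Dict.empty)).1.keys
        = (PySem.Set.ofList (l.map getCatA)).filter (fun c => decide (0 < dget per c mx))) := by
  induction l using List.reverseRecOn with
  | nil =>
    refine ⟨fun c => ?_, fun c => ?_, ?_⟩ <;>
      simp [PySem.Dict.getD_empty, PySem.Dict.keys_empty, PySem.Set.ofList, PySem.Set.empty]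
  | append_singleton l p ih =>
    obtain ⟨ihc, ihb, ihk⟩ := ih
    simp only [List.foldl_append, List.foldl_cons, List.foldl_nil]
    set st := l.foldl (stepA per mx) (PySem.Dict.empty, PySem.Dict.empty) with hst
    have hn : ∀ c, ((l ++ [p]).filter (fun q => getCatA q == c))
        = l.filter (fun q => getCatA q == c) ++ (if c = getCatA p then [p] else []) := by
      intro c
      by_cases hc : c = getCatA p
      · simp [List.filter_append, hc]
      · simp [List.filter_append, hc, beq_iff_eq, Ne.symm hc]
    have hof : PySem.Set.ofList ((l ++ [p]).map getCatA)
        = (PySem.Set.ofList (l.map getCatA)).add (getCatA p) := by simp [pysem]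
    have hmapmem : getCatA p ∉ l.map getCatA → l.filter (fun q => getCatA q == getCatA p) = [] := by
      intro hnm
      rw [List.filter_eq_nil_iff]
      intro q hq hbe
      exact hnm (List.mem_map.mpr ⟨q, hq, by simpa [beq_iff_eq] using hbe⟩)
    by_cases h : st.2.getD (getCatA p) 0 ≥ dget per (getCatA p) mx
    · have hstep : stepA per mx st p = st := by
        simp only [stepA]
        rw [if_pos h]
      rw [hstep]
      rw [ihc (getCatA p)] at h
      refine ⟨fun c => ?_, fun c => ?_, ?_⟩
      · rw [ihc c, hn c]
        by_cases hc : c = getCatA p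
        · rw [if_pos hc, List.length_append, List.length_singleton]
          rw [hc]
          push_cast
          omega
        · rw [if_neg hc, List.append_nil]
      · rw [ihb c, hn c]
        by_cases hc : c = getCatA p
        · rw [if_pos hc, hc]
          rw [List.take_append_of_le_length (by omega)]
        · rw [if_neg hc, List.append_nil]
      · rw [ihk, hof]
        by_cases hm : getCatA p ∈ PySem.Set.ofList (l.map getCatA)
        · rw [PySem.Set.add_of_mem hm]
        · rw [PySem.Set.add_of_not_mem hm]
          have hzero : l.filter (fun q => getCatA q == getCatA p) = [] :=
            hmapmem (fun hmem => hm ((PySem.Set.mem_ofList _ _).mpr hmem))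
          rw [hzero] at h
          simp only [List.length_nil] at h
          have hknp : ¬ (0 < dget per (getCatA p) mx) := by push_cast at h; omega
          simp [List.filter_append, hknp]
    · have hstep : stepA per mx st p
          = (st.1.modify (getCatA p) [] (· ++ [p]),
             st.2.insert (getCatA p) (st.2.getD (getCatA p) 0 + 1)) := by
        simp only [stepA]
        rw [if_neg h]
      rw [hstep]
      rw [ihc (getCatA p)] at h
      have hpos : 0 < dget per (getCatA p) mx := by omega
      refine ⟨fun c => ?_, fun c => ?_, ?_⟩
      · rw [PySem.Dict.getD_insert, ihc (getCatA p), hn c]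
        by_cases hc : c = getCatA p
        · rw [if_pos hc, hc, if_pos rfl, List.length_append, List.length_singleton]
          push_cast
          omega
        · rw [if_neg hc, if_neg hc, List.append_nil, ihc c]
      · rw [PySem.Dict.getD_modify, hn c]
        by_cases hc : c = getCatA p
        · rw [if_pos hc, hc, if_pos rfl, ihb (getCatA p)]
          rw [List.take_of_length_le (by omega),
              List.take_of_length_le (by rw [List.length_append]; simp; omega)]
        · rw [if_neg hc, if_neg hc, List.append_nil, ihb c]
      · rw [PySem.Dict.keys_modify, hof]
        by_cases hm : getCatA p ∈ st.1.keys
        · rw [PySem.Dict.keys_insert_of_contains _ _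
              ((PySem.Dict.contains_iff_mem_keys _ _).mpr hm)]
          have hmo : getCatA p ∈ PySem.Set.ofList (l.map getCatA) := by
            rw [ihk] at hm
            exact (List.mem_filter.mp hm).1
          rw [PySem.Set.add_of_mem hmo, ihk]
        · have hcon : st.1.contains (getCatA p) = false := by
            rw [← Bool.not_eq_true]
            intro hct
            exact hm ((PySem.Dict.contains_iff_mem_keys _ _).mp hct)
          rw [PySem.Dict.keys_insert_of_not_contains _ _ hcon, ihk]
          by_cases hmo : getCatA p ∈ PySem.Set.ofList (l.map getCatA)
          · exact absurd (by rw [ihk]; exact List.mem_filter.mpr ⟨hmo, by simp [hpos]⟩) hm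
          · rw [PySem.Set.add_of_not_mem hmo]
            simp [List.filter_append, hpos]

-- B's buckets hold the whole group, in scan order
theorem bucketsB_getD (l : List String) (c : String) :
    (l.foldl (fun b p => b.modify (getCatB p) [] (· ++ [p])) PySem.Dict.empty).getD c []
      = l.filter (fun p => getCatA p == c) := by
  show (l.foldl (fun b p => b.modify (getCatA p) [] (· ++ [p])) PySem.Dict.empty).getD c []
      = l.filter (fun p => getCatA p == c)
  have h := PySem.Dict.getD_foldl_modify_append (l.map (fun p => (getCatA p, p)))
      (PySem.Dict.empty (κ := String) (ν := List String)) c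
  rw [List.foldl_map] at h
  simp only [] at h
  rw [h, List.filter_map, List.map_map, PySem.Dict.getD_empty]
  simp [Function.comp_def]
theorem bucketsB_keys (l : List String) :
    (l.foldl (fun b p => b.modify (getCatB p) [] (· ++ [p])) PySem.Dict.empty).keys
      = PySem.Set.ofList (l.map getCatA) := by
  show (l.foldl (fun b p => b.modify (getCatA p) [] (· ++ [p])) PySem.Dict.empty).keys
      = PySem.Set.ofList (l.map getCatA)
  rw [PySem.Dict.keys_foldl_modify_key l getCatA [] (fun _ p v => v ++ [p]), PySem.Dict.keys_empty]
  simp only [PySem.Set.update, PySem.Set.ofList, PySem.Set.empty]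
theorem bucketsB_nodup (l : List String) :
    (l.foldl (fun b p => b.modify (getCatB p) [] (· ++ [p])) PySem.Dict.empty).keys.Nodup := by
  show (l.foldl (fun b p => b.modify (getCatA p) [] (· ++ [p])) PySem.Dict.empty).keys.Nodup
  exact PySem.Dict.nodup_keys_foldl_modify_key l getCatA [] (fun _ p v => v ++ [p]) _
    (by rw [PySem.Dict.keys_empty]; exact List.nodup_nil)

-- ===== VERDICT (by name: the statement is the Claim_ definition above) =====
theorem reduce_to_spec : Claim_equal_reduce_to := by
  intro paths mx per mult it _hdom _hpre
  unfold Spec_reduce_to reduce_to reduce_to_alt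
  obtain ⟨hc, hb, hk⟩ := stateA_spec per mx (PySem.List.slice paths (some it) none)
  dsimp only
  rw [foldl_keys_repeat]
  rw [foldl_guard_append (fun q : String × List String => 0 < dget per q.1 mx)
      (fun q => (List.replicate (dget mult q.1 1).toNat
        (PySem.List.slice q.2 none (some (dget per q.1 mx)))).flatten)]
  rw [PySem.Dict.items_eq_map_keys _ (bucketsB_nodup (PySem.List.slice paths (some it) none)) []]
  simp only [bucketsB_getD, bucketsB_keys, hk, hb, List.nil_append, List.filter_map,
    List.flatMap_map, Function.comp_def]
  congr 1
  simp only [List.flatMap_def]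
  apply congrArg List.flatten
  apply List.map_congr_left
  intro c hcmem
  have hQ : 0 < dget per c mx := by
    have := (List.mem_filter.mp hcmem).2
    simpa using this
  rw [PySem.List.slice_to _ (le_of_lt hQ)]
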